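-- pv_equiv track=rewrite | github.com/texazboy/lista-de-exercicios | questao56.py | determinar_pior_nota_alunos
-- ===== SOURCE A (Python) =====
-- def determinar_pior_nota_alunos(notas):
--     pior_nota_prova1 = 0
--     pior_nota_prova2 = 0
--     pior_nota_prova3 = 0
--
--     for aluno in notas:
--         if aluno[0] == min(aluno):
--             pior_nota_prova1 += 1
--         elif aluno[1] == min(aluno):
--             pior_nota_prova2 += 1
--         elif aluno[2] == min(aluno):
--             pior_nota_prova3 += 1
--
--     return pior_nota_prova1, pior_nota_prova2, pior_nota_prova3
-- ===== SOURCE B (Python) =====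
-- def determinar_pior_nota_alunos(notas):
--     # Direct comparison predicates per exam; strictness encodes the elif tie-break:
--     # exam1 is worst when a <= b and a <= c; exam2 when b < a and b <= c; exam3 when c < a and c < b.
--     p1 = sum(1 for (a, b, c) in notas if a <= b and a <= c)
--     p2 = sum(1 for (a, b, c) in notas if b < a and b <= c)
--     p3 = sum(1 for (a, b, c) in notas if c < a and c < b)
--     return (p1, p2, p3)
-- ===== Notes on version B (the rewrite author's own statement) =====
-- stated objective: alternative
-- what changed: Eliminates min() and the three-counter if/elif dispatch entirely: each counter becomes an independent pass counting rows satisfying a direct pairwise-comparison predicate (a<=b and a<=c; b<a and b<=c; c<a and c<b), with strict/non-strict inequalities encoding the earliest-exam tie-break.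
import Mathlib
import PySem

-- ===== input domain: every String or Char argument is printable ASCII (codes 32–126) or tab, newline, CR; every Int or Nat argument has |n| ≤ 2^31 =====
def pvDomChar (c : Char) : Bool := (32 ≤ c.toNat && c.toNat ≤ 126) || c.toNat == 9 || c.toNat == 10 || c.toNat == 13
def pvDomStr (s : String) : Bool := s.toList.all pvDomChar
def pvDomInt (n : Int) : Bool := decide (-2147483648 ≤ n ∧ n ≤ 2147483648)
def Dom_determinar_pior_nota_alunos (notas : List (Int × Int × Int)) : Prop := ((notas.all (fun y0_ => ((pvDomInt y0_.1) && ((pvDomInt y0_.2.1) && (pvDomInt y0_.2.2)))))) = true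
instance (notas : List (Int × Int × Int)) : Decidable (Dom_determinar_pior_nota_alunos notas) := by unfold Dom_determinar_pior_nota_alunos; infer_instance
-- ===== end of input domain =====

-- B drops min() and the if/elif dispatch: each counter is an independent pass counting
-- rows by a direct pairwise-comparison predicate, strictness encoding the elif tie-break.

-- ===== PORT A =====
-- min(aluno) over a 3-tuple of ints: its Int value equals min a (min b c), exact here.
def determinar_pior_nota_alunos (notas : List (Int × Int × Int)) : Int × Int × Int :=
  notas.foldl (fun acc aluno =>
    let m := min aluno.1 (min aluno.2.1 aluno.2.2)
    if aluno.1 = m then (acc.1 + 1, acc.2.1, acc.2.2)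
    else if aluno.2.1 = m then (acc.1, acc.2.1 + 1, acc.2.2)
    else if aluno.2.2 = m then (acc.1, acc.2.1, acc.2.2 + 1)
    else acc) (0, 0, 0)

-- ===== PORT B =====
-- sum(1 for row if cond) ported as countP over the list, cast to Int.
def determinar_pior_nota_alunos_alt (notas : List (Int × Int × Int)) : Int × Int × Int :=
  ((notas.countP (fun al => decide (al.1 ≤ al.2.1 ∧ al.1 ≤ al.2.2)) : Int),
   (notas.countP (fun al => decide (al.2.1 < al.1 ∧ al.2.1 ≤ al.2.2)) : Int),
   (notas.countP (fun al => decide (al.2.2 < al.1 ∧ al.2.2 < al.2.1)) : Int))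

-- ===== PRECONDITION & SPEC =====
def Spec_determinar_pior_nota_alunos (notas : List (Int × Int × Int)) (out : Int × Int × Int) : Prop := out = determinar_pior_nota_alunos_alt notas
instance (notas : List (Int × Int × Int)) (out : Int × Int × Int) : Decidable (Spec_determinar_pior_nota_alunos notas out) := by unfold Spec_determinar_pior_nota_alunos; infer_instance

-- ===== CLAIM =====
def Claim_equal_determinar_pior_nota_alunos : Prop := ∀ (notas : List (Int × Int × Int)), Dom_determinar_pior_nota_alunos notas → Spec_determinar_pior_nota_alunos notas (determinar_pior_nota_alunos notas)

-- ===== LEMMAS AND PROOFS =====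

theorem pvFold_eq (notas : List (Int × Int × Int)) (p q r : Int) :
    notas.foldl (fun acc aluno =>
      let m := min aluno.1 (min aluno.2.1 aluno.2.2)
      if aluno.1 = m then (acc.1 + 1, acc.2.1, acc.2.2)
      else if aluno.2.1 = m then (acc.1, acc.2.1 + 1, acc.2.2)
      else if aluno.2.2 = m then (acc.1, acc.2.1, acc.2.2 + 1)
      else acc) (p, q, r)
    = (p + (notas.countP (fun al => decide (al.1 ≤ al.2.1 ∧ al.1 ≤ al.2.2)) : Int),
       q + (notas.countP (fun al => decide (al.2.1 < al.1 ∧ al.2.1 ≤ al.2.2)) : Int),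
       r + (notas.countP (fun al => decide (al.2.2 < al.1 ∧ al.2.2 < al.2.1)) : Int)) := by
  induction notas generalizing p q r with
  | nil => simp
  | cons al t ih =>
    obtain ⟨a, b, c⟩ := al
    simp only [List.foldl_cons, List.countP_cons]
    by_cases h1 : a = min a (min b c)
    · have hp : a ≤ b ∧ a ≤ c := by constructor <;> omega
      have hq : ¬ (b < a ∧ b ≤ c) := by omega
      have hr : ¬ (c < a ∧ c < b) := by omega
      simp only [if_pos h1, ih]
      simp [hp, hq, hr]; omega
    · by_cases h2 : b = min a (min b c)
      · have hp : ¬ (a ≤ b ∧ a ≤ c) := by omega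
        have hq : b < a ∧ b ≤ c := by constructor <;> omega
        have hr : ¬ (c < a ∧ c < b) := by omega
        simp only [if_neg h1, if_pos h2, ih]
        simp [hp, hq, hr]; omega
      · have h3 : c = min a (min b c) := by omega
        have hp : ¬ (a ≤ b ∧ a ≤ c) := by omega
        have hq : ¬ (b < a ∧ b ≤ c) := by omega
        have hr : c < a ∧ c < b := by constructor <;> omega
        simp only [if_neg h1, if_neg h2, if_pos h3, ih]
        simp [hp, hq, hr]; omega

-- ===== VERDICT =====
theorem determinar_pior_nota_alunos_spec : Claim_equal_determinar_pior_nota_alunos := by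
  intro notas _
  unfold Spec_determinar_pior_nota_alunos determinar_pior_nota_alunos determinar_pior_nota_alunos_alt
  rw [pvFold_eq]
  simp
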